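-- pv_equiv track=rewrite | github.com/Ikerlb/kattis | barshelf/chat-gpt-dp.py | count_messy_trios
-- ===== SOURCE A (Python) =====
-- def count_messy_trios(heights):
--     n = len(heights)
--     messy_trios = 0
--
--     for i in range(n):
--         for j in range(i + 1, n):
--             if heights[i] >= 2 * heights[j]:
--                 messy_trios += sum(1 for k in range(j + 1, n) if heights[j] >= 2 * heights[k])
--
--     return messy_trios
-- ===== SOURCE B (Python) =====
-- def count_messy_trios(heights):
--     # One pass over the list structure: keep the prefix seen so far and the
--     # remaining suffix; for each middle element hj, multiply the number of
--     # qualifying left elements by the number of qualifying right elements.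
--     total = 0
--     before = []
--     rest = list(heights)
--     while rest:
--         hj = rest.pop(0)
--         left = sum(1 for h in before if h >= 2 * hj)
--         right = sum(1 for h in rest if hj >= 2 * h)
--         total += left * right
--         before.append(hj)
--     return total
-- ===== Notes on version B (the rewrite author's own statement) =====
-- stated objective: faster
-- what changed: Instead of A's triple nested index loops re-counting valid k for every (i,j) pair, B makes one structural pass over the list keeping a prefix and a shrinking suffix, and for each middle element multiplies the count of qualifying left elements by the count of qualifying right elements.
import Mathlib
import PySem

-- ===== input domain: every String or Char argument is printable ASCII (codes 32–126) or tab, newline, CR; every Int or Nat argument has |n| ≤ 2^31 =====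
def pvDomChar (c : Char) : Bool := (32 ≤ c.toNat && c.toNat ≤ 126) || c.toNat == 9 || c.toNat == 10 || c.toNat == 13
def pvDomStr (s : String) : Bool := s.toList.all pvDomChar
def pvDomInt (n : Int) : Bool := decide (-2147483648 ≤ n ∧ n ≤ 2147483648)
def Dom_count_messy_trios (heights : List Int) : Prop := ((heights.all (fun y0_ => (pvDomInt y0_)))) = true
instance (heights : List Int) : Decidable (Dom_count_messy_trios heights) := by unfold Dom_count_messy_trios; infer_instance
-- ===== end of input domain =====

-- B replaces A's triple nested index loops by one structural pass with prefix/suffix counts multiplied per middle element (O(n^3) → O(n^2)).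


-- ===== PORT A =====
def count_messy_trios (heights : List Int) : Int :=
  let n : Int := PySem.List.len heights
  (PySem.List.pyRange 0 n 1).foldl (fun acc i =>
    (PySem.List.pyRange (i + 1) n 1).foldl (fun acc j =>
      if PySem.List.pyGetD heights i 0 ≥ 2 * PySem.List.pyGetD heights j 0 then
        acc + ((PySem.List.pyRange (j + 1) n 1).map (fun k =>
          if PySem.List.pyGetD heights j 0 ≥ 2 * PySem.List.pyGetD heights k 0 then (1 : Int) else 0)).sum
      else acc) acc) 0

-- ===== PORT B =====
-- the while loop of Source B: pop the head of `rest`, count matches in `before` and in `rest`, accumulate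
def countMessyGo (before : List Int) (rest : List Int) (total : Int) : Int :=
  match rest with
  | [] => total
  | hj :: rest' =>
      let left : Int := before.countP (fun h => decide (h ≥ 2 * hj))
      let right : Int := rest'.countP (fun h => decide (hj ≥ 2 * h))
      countMessyGo (before ++ [hj]) rest' (total + left * right)

def count_messy_trios_alt (heights : List Int) : Int :=
  countMessyGo [] heights 0

-- ===== PRECONDITION & SPEC =====
def Spec_count_messy_trios (heights : List Int) (out : Int) : Prop := out = count_messy_trios_alt heights
instance (heights : List Int) (out : Int) : Decidable (Spec_count_messy_trios heights out) := by unfold Spec_count_messy_trios; infer_instance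

-- ===== CLAIM (what is proved, stated in full; the proofs are below) =====
def Claim_equal_count_messy_trios : Prop := ∀ (heights : List Int), Dom_count_messy_trios heights → Spec_count_messy_trios heights (count_messy_trios heights)

-- ===== LEMMAS AND PROOFS =====

theorem foldl_ite_add {α : Type} (l : List α) (p : α → Prop) [DecidablePred p] (f : α → Int) (a : Int) :
    l.foldl (fun acc x => if p x then acc + f x else acc) a
      = a + (l.map (fun x => if p x then f x else 0)).sum := by
  have h : (fun (acc : Int) x => if p x then acc + f x else acc)
      = (fun acc x => acc + (if p x then f x else 0)) := by
    funext acc x; split <;> simp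
  rw [h, PySem.List.foldl_add]

theorem pyRangeSum (a b : Int) (ha : 0 ≤ a) (F : Int → Int) :
    ((PySem.List.pyRange a b 1).map F).sum = ∑ t ∈ Finset.Ico a.toNat b.toNat, F (t : Int) := by
  rw [PySem.List.pyRange_one, List.map_map, Finset.sum_Ico_eq_sum_range]
  have hn : b.toNat - a.toNat = (b - a).toNat := by omega
  rw [hn]
  have : ((List.range (b - a).toNat).map (F ∘ fun k => a + ↑k)).sum
      = ∑ i ∈ Finset.range (b - a).toNat, F (a + ↑i) := rfl
  rw [this]
  apply Finset.sum_congr rfl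
  intro i _
  congr 1
  omega

theorem swapSum (n : ℕ) (f : ℕ → ℕ → Int) :
    ∑ i ∈ Finset.range n, ∑ j ∈ Finset.Ico (i+1) n, f i j
      = ∑ j ∈ Finset.range n, ∑ i ∈ Finset.range j, f i j := by
  induction n with
  | zero => simp
  | succ n ih =>
      rw [Finset.sum_range_succ, Finset.sum_range_succ]
      have h1 : ∀ i ∈ Finset.range n, ∑ j ∈ Finset.Ico (i+1) (n+1), f i j
          = (∑ j ∈ Finset.Ico (i+1) n, f i j) + f i n := by
        intro i hi
        have := Finset.mem_range.mp hi
        rw [Finset.sum_Ico_succ_top (by omega)]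
      rw [Finset.sum_congr rfl h1, Finset.sum_add_distrib, ih]
      simp

theorem A_char (heights : List Int) :
    count_messy_trios heights
      = ∑ i ∈ Finset.range heights.length, ∑ j ∈ Finset.Ico (i+1) heights.length,
          (if heights.getD i 0 ≥ 2 * heights.getD j 0 then
             ∑ k ∈ Finset.Ico (j+1) heights.length, (if heights.getD j 0 ≥ 2 * heights.getD k 0 then (1:Int) else 0)
           else 0) := by
  unfold count_messy_trios
  simp only []
  have hinner : ∀ (acc i : Int),
      (PySem.List.pyRange (i + 1) (PySem.List.len heights) 1).foldl (fun acc j =>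
        if PySem.List.pyGetD heights i 0 ≥ 2 * PySem.List.pyGetD heights j 0 then
          acc + ((PySem.List.pyRange (j + 1) (PySem.List.len heights) 1).map (fun k =>
            if PySem.List.pyGetD heights j 0 ≥ 2 * PySem.List.pyGetD heights k 0 then (1 : Int) else 0)).sum
        else acc) acc
      = acc + ((PySem.List.pyRange (i + 1) (PySem.List.len heights) 1).map (fun j =>
          if PySem.List.pyGetD heights i 0 ≥ 2 * PySem.List.pyGetD heights j 0 then
            ((PySem.List.pyRange (j + 1) (PySem.List.len heights) 1).map (fun k =>
              if PySem.List.pyGetD heights j 0 ≥ 2 * PySem.List.pyGetD heights k 0 then (1 : Int) else 0)).sum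
          else 0)).sum := by
    intro acc i
    exact foldl_ite_add _ _ _ _
  simp only [hinner]
  rw [PySem.List.foldl_add, zero_add, pyRangeSum 0 _ le_rfl]
  have hlen : (PySem.List.len heights).toNat = heights.length := by
    simp [PySem.List.len_eq]
  rw [Int.toNat_zero, hlen, ← Finset.range_eq_Ico]
  apply Finset.sum_congr rfl
  intro i hi
  rw [pyRangeSum ((i:Int)+1) _ (by positivity)]
  have h1 : ((i:Int)+1).toNat = i + 1 := by omega
  rw [h1, hlen]
  apply Finset.sum_congr rfl
  intro j hj
  rw [pyRangeSum ((j:Int)+1) _ (by positivity)]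
  have h2 : ((j:Int)+1).toNat = j + 1 := by omega
  rw [h2, hlen]
  simp [PySem.List.pyGetD_natCast]

-- counting a prefix via countP equals the indexed indicator sum
theorem countTake (l : List Int) (j : ℕ) (hj : j ≤ l.length) (p : Int → Bool) :
    (((l.take j).countP p : ℕ) : Int) = ∑ i ∈ Finset.range j, (if p (l.getD i 0) then (1:Int) else 0) := by
  induction j with
  | zero => simp
  | succ j ih =>
      have hjl : j < l.length := by omega
      have h : l[j]? = some l[j] := List.getElem?_eq_getElem hjl
      have hg : l.getD j 0 = l[j] := by simp [List.getD, h]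
      rw [Finset.sum_range_succ, ← ih (by omega), List.take_add_one, h]
      simp only [Option.toList_some, List.countP_append, List.countP_cons, List.countP_nil, hg]
      rcases hp : p l[j] <;> simp [hp]

theorem getD_drop (l : List Int) (j i : ℕ) :
    (l.drop j).getD i 0 = l.getD (j + i) 0 := by
  simp [List.getD, List.getElem?_drop]

-- counting a suffix via countP equals the indexed indicator sum
theorem countDrop (l : List Int) (j : ℕ) (p : Int → Bool) :
    (((l.drop j).countP p : ℕ) : Int) = ∑ k ∈ Finset.Ico j l.length, (if p (l.getD k 0) then (1:Int) else 0) := by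
  have h1 : ((l.drop j).take ((l.drop j).length)) = l.drop j := List.take_length
  have := countTake (l.drop j) ((l.drop j).length) le_rfl p
  rw [h1] at this
  rw [this, Finset.sum_Ico_eq_sum_range]
  have hlen : (l.drop j).length = l.length - j := List.length_drop
  rw [hlen]
  apply Finset.sum_congr rfl
  intro i _
  rw [getD_drop]

-- loop invariant of B's pass
theorem countMessyGo_char (rest : List Int) : ∀ (before : List Int) (total : Int),
    countMessyGo before rest total
      = total + ∑ j ∈ Finset.range rest.length,
          (((before ++ rest.take j).countP (fun h => decide (h ≥ 2 * rest.getD j 0)) : ℕ) : Int)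
          * (((rest.drop (j+1)).countP (fun h => decide (rest.getD j 0 ≥ 2 * h)) : ℕ) : Int) := by
  induction rest with
  | nil => intro before total; simp [countMessyGo]
  | cons hj after ih =>
      intro before total
      rw [countMessyGo, ih, List.length_cons, Finset.sum_range_succ']
      simp only [List.take_succ_cons, List.getD_cons_succ, List.drop_succ_cons,
        List.getD_cons_zero, List.take_zero, List.append_nil, List.drop_zero,
        List.append_assoc, List.cons_append, List.nil_append]
      ring

theorem B_char (heights : List Int) :
    count_messy_trios_alt heights
      = ∑ j ∈ Finset.range heights.length,
          (((heights.take j).countP (fun h => decide (h ≥ 2 * heights.getD j 0)) : ℕ) : Int)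
          * (((heights.drop (j+1)).countP (fun h => decide (heights.getD j 0 ≥ 2 * h)) : ℕ) : Int) := by
  unfold count_messy_trios_alt
  rw [countMessyGo_char]
  simp

-- ===== VERDICT (by name: the statement is the Claim_ definition above) =====
theorem count_messy_trios_spec : Claim_equal_count_messy_trios := by
  intro heights _
  unfold Spec_count_messy_trios
  rw [A_char, B_char]
  have hite : ∀ i j : ℕ,
      (if heights.getD i 0 ≥ 2 * heights.getD j 0 then
         ∑ k ∈ Finset.Ico (j+1) heights.length, (if heights.getD j 0 ≥ 2 * heights.getD k 0 then (1:Int) else 0)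
       else 0)
      = (if heights.getD i 0 ≥ 2 * heights.getD j 0 then (1:Int) else 0)
        * ∑ k ∈ Finset.Ico (j+1) heights.length, (if heights.getD j 0 ≥ 2 * heights.getD k 0 then (1:Int) else 0) := by
    intro i j; split <;> simp
  simp only [hite]
  rw [swapSum]
  apply Finset.sum_congr rfl
  intro j hj
  rw [← Finset.sum_mul]
  rw [countTake heights j (by exact Nat.le_of_lt (Finset.mem_range.mp hj)), countDrop]
  simp
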